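-- pv_equiv track=rewrite | github.com/csp-12332/sunny | tac.py | preaft
-- ===== SOURCE A (Python) =====
-- OPERATORS = set(['+', '-', '*', '/', '(', ')', '^'])
--
-- def preaft(exp,op):
--     ind=exp.index(op)
--     pre=aft=0
--     for i in range(ind):
--         if(exp[i] in OPERATORS):
--             pre=i
--     for i in range(ind+1,len(exp)):
--         if(exp[i] in OPERATORS):
--             aft=i
--             break
--
--     return pre,aft
-- ===== SOURCE B (Python) =====
-- OPERATORS = set(['+', '-', '*', '/', '(', ')', '^'])
--
-- def preaft(exp, op):
--     # single left-to-right pass: a small state machine instead of index() + two range loops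
--     ind = None
--     pre = aft = 0
--     for i, t in enumerate(exp):
--         if ind is None:
--             if t == op:
--                 ind = i
--             elif t in OPERATORS:
--                 pre = i
--         elif aft == 0 and t in OPERATORS:
--             aft = i
--     if ind is None:
--         raise ValueError(f"{op!r} is not in list")
--     return pre, aft
-- ===== Notes on version B (the rewrite author's own statement) =====
-- stated objective: alternative
-- what changed: B replaces index() plus two index-range loops by a single left-to-right pass: a three-state machine over enumerate(exp) that tracks the last operator before the token, whether the token has been seen, and the first operator after it.
import Mathlib
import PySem

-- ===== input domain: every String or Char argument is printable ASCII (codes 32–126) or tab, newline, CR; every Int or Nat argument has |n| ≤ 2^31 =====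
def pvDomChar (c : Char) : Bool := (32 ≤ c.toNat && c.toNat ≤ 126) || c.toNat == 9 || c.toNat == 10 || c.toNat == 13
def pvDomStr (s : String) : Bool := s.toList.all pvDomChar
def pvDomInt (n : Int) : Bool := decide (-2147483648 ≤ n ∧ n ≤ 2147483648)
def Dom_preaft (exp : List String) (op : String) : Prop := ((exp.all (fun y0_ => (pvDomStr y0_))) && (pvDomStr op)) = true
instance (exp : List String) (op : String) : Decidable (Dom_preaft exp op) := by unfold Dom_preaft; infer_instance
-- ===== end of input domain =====

-- B replaces index() plus two range loops by one left-to-right state-machine pass over enumerate(exp) (alternative decomposition, same cost).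


-- ===== PORT A =====
def OPS : List String := ["+", "-", "*", "/", "(", ")", "^"]

-- the second loop of A: 'for i in range(ind+1, len(exp)): if exp[i] in OPERATORS: aft = i; break'
def aftLoop (exp : List String) : List Int → Int
  | [] => 0
  | i :: rest => if OPS.contains (PySem.List.pyGetD exp i "") then i else aftLoop exp rest

def preaft (exp : List String) (op : String) : Int × Int :=
  match PySem.List.index? exp op with
  | none => (0, 0)   -- Python raises ValueError here; excluded by Pre_preaft
  | some ind0 =>
    let ind : Int := ind0
    let pre : Int := (PySem.List.pyRange 0 ind 1).foldl
      (fun pre i => if OPS.contains (PySem.List.pyGetD exp i "") then i else pre) 0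
    let aft : Int := aftLoop exp (PySem.List.pyRange (ind + 1) exp.length 1)
    (pre, aft)

-- ===== PORT B =====
-- B's loop body: state (ind, pre, aft); ind = none ↔ Python's 'ind is None'
def stepB (op : String) (st : Option Int × Int × Int) (p : Int × String) : Option Int × Int × Int :=
  match st with
  | (none, pre, aft) =>
      if p.2 == op then (some p.1, pre, aft)
      else if OPS.contains p.2 then (none, p.1, aft)
      else (none, pre, aft)
  | (some j, pre, aft) =>
      if aft == 0 && OPS.contains p.2 then (some j, pre, p.1) else (some j, pre, aft)

def preaft_alt (exp : List String) (op : String) : Int × Int :=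
  match (PySem.List.enumerate exp 0).foldl (stepB op) (none, 0, 0) with
  | (none, _, _) => (0, 0)   -- Python raises ValueError here; excluded by Pre_preaft
  | (some _, pre, aft) => (pre, aft)

-- ===== PRECONDITION & SPEC =====
-- Pre_ excludes exactly the inputs where op does not occur in exp, on which both Pythons raise ValueError.
def Pre_preaft (exp : List String) (op : String) : Prop := op ∈ exp
instance (exp : List String) (op : String) : Decidable (Pre_preaft exp op) := by unfold Pre_preaft; infer_instance
def pvWitness_preaft : List String × String := (["1", "+", "2"], "+")

def Spec_preaft (exp : List String) (op : String) (out : Int × Int) : Prop := out = preaft_alt exp op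
instance (exp : List String) (op : String) (out : Int × Int) : Decidable (Spec_preaft exp op out) := by unfold Spec_preaft; infer_instance

-- ===== CLAIM (what is proved, stated in full; the proofs are below) =====
def Claim_equal_preaft : Prop := ∀ (exp : List String) (op : String), Dom_preaft exp op → Pre_preaft exp op → Spec_preaft exp op (preaft exp op)

-- ===== LEMMAS AND PROOFS =====

-- indices of operator tokens in a (index, token) list
def opsIdx (l : List (Int × String)) : List Int :=
  (l.filter (fun p => OPS.contains p.2)).map (·.1)

-- keep-last fold = last filtered element (or the accumulator)
theorem foldl_keep_last (P : Int → Bool) (l : List Int) (a : Int) :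
    l.foldl (fun acc i => if P i then i else acc) a = ((l.filter P).getLast?).getD a := by
  induction l generalizing a with
  | nil => rfl
  | cons i l ih =>
    by_cases h : P i
    · rw [List.foldl_cons]
      simp only [h, if_true]
      rw [ih i]
      cases hl : (l.filter P) with
      | nil => simp [h, hl]
      | cons x xs => simp [h, hl, List.getLast?_cons]
    · rw [List.foldl_cons, if_neg h, ih a]
      simp [h]

-- break scan = first filtered element (or 0)
theorem aftLoop_eq_head (exp : List String) (l : List Int) :
    aftLoop exp l = ((l.filter (fun i => OPS.contains (PySem.List.pyGetD exp i ""))).head?).getD 0 := by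
  induction l with
  | nil => rfl
  | cons i l ih =>
    by_cases h : PySem.List.pyGetD exp i "" ∈ OPS
    · simp [aftLoop, h]
    · simp [aftLoop, h, ih]

-- the enumerate-based operator-index list is the filtered index range
theorem ops_eq_filter_range (exp : List String) :
    opsIdx (PySem.List.enumerate exp 0)
      = (PySem.List.pyRange 0 exp.length 1).filter
          (fun i => OPS.contains (PySem.List.pyGetD exp i "")) := by
  unfold opsIdx
  rw [PySem.List.enumerate_eq_map_pyRange exp ""]
  rw [List.filter_map, List.map_map]
  simp [Function.comp_def, PySem.List.len]

theorem filter_range_split (P : Int → Bool) (a m b : Int) (h1 : a ≤ m) (h2 : m ≤ b) :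
    (PySem.List.pyRange a b 1).filter P
      = (PySem.List.pyRange a m 1).filter P ++ (PySem.List.pyRange m b 1).filter P := by
  rw [PySem.List.pyRange_one_append a m b h1 h2, List.filter_append]

theorem filter_lt_of_range (P : Int → Bool) (ind n : Int) (h1 : 0 ≤ ind) (h2 : ind ≤ n) :
    ((PySem.List.pyRange 0 n 1).filter P).filter (fun i => decide (i < ind))
      = (PySem.List.pyRange 0 ind 1).filter P := by
  rw [List.filter_filter, filter_range_split _ 0 ind n h1 h2]
  have hA : (PySem.List.pyRange 0 ind 1).filter (fun i => decide (i < ind) && P i)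
      = (PySem.List.pyRange 0 ind 1).filter P := by
    apply List.filter_congr
    intro x hx
    have := (PySem.List.mem_pyRange_one).mp hx
    simp [this.2]
  have hB : (PySem.List.pyRange ind n 1).filter (fun i => decide (i < ind) && P i) = [] := by
    rw [List.filter_eq_nil_iff]
    intro x hx
    have := (PySem.List.mem_pyRange_one).mp hx
    simp [not_lt.mpr this.1]
  rw [hA, hB, List.append_nil]

theorem filter_gt_of_range (P : Int → Bool) (ind n : Int) (h1 : 0 ≤ ind) (h2 : ind < n) :
    ((PySem.List.pyRange 0 n 1).filter P).filter (fun i => decide (ind < i))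
      = (PySem.List.pyRange (ind + 1) n 1).filter P := by
  rw [List.filter_filter, filter_range_split _ 0 (ind + 1) n (by omega) (by omega)]
  have hA : (PySem.List.pyRange 0 (ind + 1) 1).filter (fun i => decide (ind < i) && P i) = [] := by
    rw [List.filter_eq_nil_iff]
    intro x hx
    have := (PySem.List.mem_pyRange_one).mp hx
    simp [not_lt.mpr (by omega : x ≤ ind)]
  have hB : (PySem.List.pyRange (ind + 1) n 1).filter (fun i => decide (ind < i) && P i)
      = (PySem.List.pyRange (ind + 1) n 1).filter P := by
    apply List.filter_congr
    intro x hx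
    have := (PySem.List.mem_pyRange_one).mp hx
    simp [(by omega : ind < x)]
  rw [hA, hB, List.nil_append]

theorem index?_lt_length (exp : List String) (op : String) (k : Nat)
    (h : PySem.List.index? exp op = some k) : k < exp.length := by
  rcases (PySem.List.index?_eq_some_iff exp op k).mp h with ⟨pre, suf, hx, hk, -⟩
  subst hx; subst hk
  simp

-- A's value in terms of the filtered enumerate list (via the lemmas above)
theorem preaft_char (exp : List String) (op : String) (ind0 : Nat)
    (h : PySem.List.index? exp op = some ind0) :
    preaft exp op
      = (((opsIdx (PySem.List.enumerate exp 0)).filter (fun i => decide (i < (ind0 : Int)))).getLast?.getD 0,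
         ((opsIdx (PySem.List.enumerate exp 0)).filter (fun i => decide ((ind0 : Int) < i))).head?.getD 0) := by
  have hlt : ind0 < exp.length := index?_lt_length exp op ind0 h
  unfold preaft
  rw [h]
  simp only []
  set P : Int → Bool := fun i => OPS.contains (PySem.List.pyGetD exp i "") with hP
  refine Prod.ext ?_ ?_
  · show (PySem.List.pyRange 0 ind0 1).foldl (fun pre i => if P i then i else pre) 0 = _
    rw [foldl_keep_last, ops_eq_filter_range,
      filter_lt_of_range P ind0 exp.length (by omega) (by exact_mod_cast Nat.le_of_lt hlt)]
  · show aftLoop exp (PySem.List.pyRange ((ind0 : Int) + 1) exp.length 1) = _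
    rw [aftLoop_eq_head, ops_eq_filter_range,
      filter_gt_of_range P ind0 exp.length (by omega) (by exact_mod_cast hlt)]

-- Phase 1: before the token is seen (no pair carries op), the fold keeps ind = none,
-- tracks the last operator index, and leaves aft unchanged.
theorem stepB_phase1 (op : String) (l : List (Int × String)) (a c : Int)
    (h : ∀ p ∈ l, p.2 ≠ op) :
    l.foldl (stepB op) (none, a, c) = (none, ((opsIdx l).getLast?).getD a, c) := by
  induction l generalizing a with
  | nil => rfl
  | cons p l ih =>
    have hp : p.2 ≠ op := h p (List.mem_cons_self)
    have hl : ∀ q ∈ l, q.2 ≠ op := fun q hq => h q (List.mem_cons_of_mem _ hq)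
    by_cases hop : p.2 ∈ OPS
    · rw [List.foldl_cons]
      have hs : stepB op (none, a, c) p = (none, p.1, c) := by
        simp [stepB, hp, hop]
      rw [hs, ih p.1 hl]
      unfold opsIdx
      rw [List.filter_cons_of_pos (by simpa using hop), List.map_cons]
      cases hrest : (l.filter (fun q => OPS.contains q.2)).map (·.1) with
      | nil => simp
      | cons x xs => simp [List.getLast?_cons]
    · rw [List.foldl_cons]
      have hs : stepB op (none, a, c) p = (none, a, c) := by
        simp [stepB, hp, hop]
      rw [hs, ih a hl]
      unfold opsIdx
      rw [List.filter_cons_of_neg (by simpa using hop)]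

-- Phase 2: once aft ≠ 0 the state is absorbing.
theorem stepB_phase2 (op : String) (l : List (Int × String)) (j a c : Int) (hc : c ≠ 0) :
    l.foldl (stepB op) (some j, a, c) = (some j, a, c) := by
  induction l with
  | nil => rfl
  | cons p l ih =>
    rw [List.foldl_cons]
    have : stepB op (some j, a, c) p = (some j, a, c) := by
      simp [stepB, beq_eq_false_iff_ne.mpr hc]
    rw [this, ih]

-- Phase 3: after the token, with aft = 0 and all indices positive, the fold picks
-- the first operator index.
theorem stepB_phase3 (op : String) (l : List (Int × String)) (j a : Int)
    (h : ∀ p ∈ l, 0 < p.1) :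
    l.foldl (stepB op) (some j, a, 0) = (some j, a, ((opsIdx l).head?).getD 0) := by
  induction l with
  | nil => rfl
  | cons p l ih =>
    have hp : (0 : Int) < p.1 := h p (List.mem_cons_self)
    have hl : ∀ q ∈ l, 0 < q.1 := fun q hq => h q (List.mem_cons_of_mem _ hq)
    by_cases hop : p.2 ∈ OPS
    · rw [List.foldl_cons]
      have hs : stepB op (some j, a, 0) p = (some j, a, p.1) := by
        simp [stepB, hop]
      rw [hs, stepB_phase2 op l j a p.1 (by omega)]
      unfold opsIdx
      rw [List.filter_cons_of_pos (by simpa using hop)]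
      simp
    · rw [List.foldl_cons]
      have hs : stepB op (some j, a, 0) p = (some j, a, 0) := by
        simp [stepB, hop]
      rw [hs, ih hl]
      unfold opsIdx
      rw [List.filter_cons_of_neg (by simpa using hop)]

-- opsIdx distributes over append
theorem opsIdx_append (l1 l2 : List (Int × String)) :
    opsIdx (l1 ++ l2) = opsIdx l1 ++ opsIdx l2 := by
  unfold opsIdx
  rw [List.filter_append, List.map_append]

-- ===== VERDICT (by name: the statement is the Claim_ definition above) =====
theorem preaft_spec : Claim_equal_preaft := by
  intro exp op _ hpre
  obtain ⟨ind0, h⟩ := Option.isSome_iff_exists.mp ((PySem.List.index?_isSome_iff exp op).mpr hpre)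
  rcases (PySem.List.index?_eq_some_iff exp op ind0).mp h with ⟨pref, suf, hx, hk, hnp⟩
  unfold Spec_preaft
  -- split the enumerate list at the token
  have hE : PySem.List.enumerate exp 0
      = PySem.List.enumerate pref 0 ++ (((ind0 : Int), op) :: PySem.List.enumerate suf ((ind0 : Int) + 1)) := by
    rw [hx, PySem.List.enumerate_append]
    simp [PySem.List.enumerate_cons, hk]
  have h1 : ∀ p ∈ PySem.List.enumerate pref 0, p.2 ≠ op := by
    intro p hp hpe
    exact hnp (by
      have := List.mem_map_of_mem (f := (·.2)) hp
      rw [PySem.List.map_snd_enumerate] at this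
      simpa [hpe] using this)
  have h3 : ∀ p ∈ PySem.List.enumerate suf ((ind0 : Int) + 1), 0 < p.1 := by
    intro p hp
    rcases (PySem.List.mem_enumerate_iff _ _ _).mp hp with ⟨k, hk2, rfl⟩
    omega
  -- evaluate B's fold in phases
  have hfold : (PySem.List.enumerate exp 0).foldl (stepB op) (none, 0, 0)
      = (some (ind0 : Int), ((opsIdx (PySem.List.enumerate pref 0)).getLast?).getD 0,
         ((opsIdx (PySem.List.enumerate suf ((ind0 : Int) + 1))).head?).getD 0) := by
    rw [hE, List.foldl_append, stepB_phase1 op _ 0 0 h1, List.foldl_cons]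
    have hstep : stepB op (none, ((opsIdx (PySem.List.enumerate pref 0)).getLast?).getD 0, 0)
        ((ind0 : Int), op)
        = (some (ind0 : Int), ((opsIdx (PySem.List.enumerate pref 0)).getLast?).getD 0, 0) := by
      simp [stepB]
    rw [hstep, stepB_phase3 op _ _ _ h3]
  have hB : preaft_alt exp op
      = (((opsIdx (PySem.List.enumerate pref 0)).getLast?).getD 0,
         ((opsIdx (PySem.List.enumerate suf ((ind0 : Int) + 1))).head?).getD 0) := by
    unfold preaft_alt
    rw [hfold]
  -- identify A's filtered pieces with B's phase results
  have hpre_b : ∀ i ∈ opsIdx (PySem.List.enumerate pref 0), i < (ind0 : Int) := by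
    intro i hi
    unfold opsIdx at hi
    rcases List.mem_map.mp hi with ⟨p, hp, rfl⟩
    rcases (PySem.List.mem_enumerate_iff _ _ _).mp (List.mem_of_mem_filter hp) with ⟨k2, hk2, rfl⟩
    simp only [hk] at hk2 ⊢
    omega
  have hsuf_b : ∀ i ∈ opsIdx (PySem.List.enumerate suf ((ind0 : Int) + 1)), (ind0 : Int) < i := by
    intro i hi
    unfold opsIdx at hi
    rcases List.mem_map.mp hi with ⟨p, hp, rfl⟩
    rcases (PySem.List.mem_enumerate_iff _ _ _).mp (List.mem_of_mem_filter hp) with ⟨k2, hk2, rfl⟩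
    omega
  have hmid : ∀ i ∈ opsIdx [((ind0 : Int), op)], i = (ind0 : Int) := by
    intro i hi
    unfold opsIdx at hi
    rcases List.mem_map.mp hi with ⟨p, hp, rfl⟩
    have h2 := List.mem_of_mem_filter hp
    simp only [List.mem_singleton] at h2
    rw [h2]
  have hsplit : opsIdx (PySem.List.enumerate exp 0)
      = opsIdx (PySem.List.enumerate pref 0)
        ++ opsIdx [((ind0 : Int), op)]
        ++ opsIdx (PySem.List.enumerate suf ((ind0 : Int) + 1)) := by
    rw [hE, show (((ind0 : Int), op) :: PySem.List.enumerate suf ((ind0 : Int) + 1))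
        = [((ind0 : Int), op)] ++ PySem.List.enumerate suf ((ind0 : Int) + 1) from rfl,
      opsIdx_append, opsIdx_append, List.append_assoc]
  have hpreEq : (opsIdx (PySem.List.enumerate exp 0)).filter (fun i => decide (i < (ind0 : Int)))
      = opsIdx (PySem.List.enumerate pref 0) := by
    rw [hsplit, List.filter_append, List.filter_append]
    rw [List.filter_eq_self.mpr (by intro i hi; simpa using hpre_b i hi)]
    rw [List.filter_eq_nil_iff.mpr (by intro i hi; simp [hmid i hi])]
    rw [List.filter_eq_nil_iff.mpr (by intro i hi; simpa using not_lt.mpr (le_of_lt (hsuf_b i hi)))]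
    simp
  have haftEq : (opsIdx (PySem.List.enumerate exp 0)).filter (fun i => decide ((ind0 : Int) < i))
      = opsIdx (PySem.List.enumerate suf ((ind0 : Int) + 1)) := by
    rw [hsplit, List.filter_append, List.filter_append]
    rw [List.filter_eq_nil_iff.mpr (by intro i hi; simpa using not_lt.mpr (le_of_lt (hpre_b i hi)))]
    rw [List.filter_eq_nil_iff.mpr (by intro i hi; simp [hmid i hi])]
    rw [List.filter_eq_self.mpr (by intro i hi; simpa using hsuf_b i hi)]
    simp
  rw [preaft_char exp op ind0 h, hB, hpreEq, haftEq]
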